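-- pv_equiv track=rewrite | github.com/domi1504/sat-project | sat/encoding/bit_matrix.py | syntax_check_bit_matrix
-- ===== SOURCE A (Python) =====
-- def syntax_check_bit_matrix(matrix: str):
--     """
--     Checks if a given string representation is a syntactically valid bit matrix.
--
--     A valid bit matrix string must:
--     - Contain only '0', '1', and newline characters
--     - Have all lines of equal length
--     - Have an even number of characters per line (2 per variable)
--     - Contain only valid binary digits (no other characters)
--
--     :param matrix: String representing the bit matrix.
--     :return: True if the syntax is valid; False otherwise.
--     """
--
--     # Check for valid chars
--     for c in matrix:
--         if c not in ['0', '1', '\n']: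
--             return False
--
--     # Last line empty
--     lines = matrix.split("\n")
--
--     # Check all lines are bit strings of same even length
--     for l in lines:
--         if len(l) % 2 != 0:
--             return False
--         if len(l) != len(lines[0]):
--             return False
--         if len(l) != l.count('0') + l.count('1'):
--             return False
--
--     return True
-- ===== SOURCE B (Python) =====
-- def syntax_check_bit_matrix(matrix: str):
--     # Single left-to-right pass: validate characters and line lengths together,
--     # tracking the current line's length and the first line's length.
--     first = None
--     cur = 0
--     for c in matrix:
--         if c == '\n':
--             if first is None:
--                 first = cur
--             if cur != first or cur % 2 != 0:
--                 return False
--             cur = 0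
--         elif c == '0' or c == '1':
--             cur += 1
--         else:
--             return False
--     if first is None:
--         first = cur
--     return cur == first and cur % 2 == 0
-- ===== Notes on version B (the rewrite author's own statement) =====
-- stated objective: alternative
-- what changed: Replaced A's character scan plus newline-split plus per-line evenness/first-length/count checks by one single-pass state machine over the string that tracks the current line length and the first line's length, with no split and no count calls.
import Mathlib
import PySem

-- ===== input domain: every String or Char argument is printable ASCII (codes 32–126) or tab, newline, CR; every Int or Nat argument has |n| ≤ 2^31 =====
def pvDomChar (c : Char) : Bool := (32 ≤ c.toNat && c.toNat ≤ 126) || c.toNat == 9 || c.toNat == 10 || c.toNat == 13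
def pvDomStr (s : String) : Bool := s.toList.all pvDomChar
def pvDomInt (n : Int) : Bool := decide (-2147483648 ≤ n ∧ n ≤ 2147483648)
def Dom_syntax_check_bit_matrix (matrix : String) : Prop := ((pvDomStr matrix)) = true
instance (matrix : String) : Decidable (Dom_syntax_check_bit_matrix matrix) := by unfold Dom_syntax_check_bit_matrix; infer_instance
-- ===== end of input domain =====

-- B replaces A's char scan + split('\n') + per-line even/first-length/count checks by one
-- single-pass state machine over the characters (alternative decomposition, same O(n) cost).

-- ===== PORT A =====
-- 'for c in matrix: if c not in ['0','1','\n']: return False'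
def pvACharCheck : List Char → Bool
  | [] => true
  | c :: cs => if ¬ (c = '0' ∨ c = '1' ∨ c = '\n') then false else pvACharCheck cs

-- 'for l in lines: …' with the three early returns, firstLen = len(lines[0])
def pvALineLoop (firstLen : Nat) : List (List Char) → Bool
  | [] => true
  | l :: ls =>
    if l.length % 2 ≠ 0 then false
    else if l.length ≠ firstLen then false
    else if l.length ≠ PySem.Chars.count l ['0'] + PySem.Chars.count l ['1'] then false
    else pvALineLoop firstLen ls

def syntax_check_bit_matrix (matrix : String) : Bool :=
  if ¬ pvACharCheck matrix.toList then false
  else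
    let lines := PySem.Chars.splitOn matrix.toList ['\n']
    pvALineLoop (lines.headD []).length lines

-- ===== PORT B =====
-- the single for-loop of Source B: state = (first : Option Nat, cur : Nat)
def pvBLoop : List Char → Option Nat → Nat → Bool
  | [], first, cur => cur == first.getD cur && cur % 2 == 0
  | c :: cs, first, cur =>
    if c = '\n' then
      let f := first.getD cur
      if cur ≠ f ∨ cur % 2 ≠ 0 then false else pvBLoop cs (some f) 0
    else if c = '0' ∨ c = '1' then pvBLoop cs first (cur + 1)
    else false

def syntax_check_bit_matrix_alt (matrix : String) : Bool :=
  pvBLoop matrix.toList none 0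

-- ===== PRECONDITION & SPEC =====
def Spec_syntax_check_bit_matrix (matrix : String) (out : Bool) : Prop := out = syntax_check_bit_matrix_alt matrix
instance (matrix : String) (out : Bool) : Decidable (Spec_syntax_check_bit_matrix matrix out) := by unfold Spec_syntax_check_bit_matrix; infer_instance

-- ===== CLAIM (what is proved, stated in full; the proofs are below) =====
def Claim_equal_syntax_check_bit_matrix : Prop := ∀ (matrix : String), Dom_syntax_check_bit_matrix matrix → Spec_syntax_check_bit_matrix matrix (syntax_check_bit_matrix matrix)

-- ===== LEMMAS AND PROOFS =====

-- splitting on a single '\n', written as a plain structural recursion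
def pvNsplit : List Char → List (List Char)
  | [] => [[]]
  | c :: cs =>
    if c = '\n' then [] :: pvNsplit cs
    else
      match pvNsplit cs with
      | t :: ts => (c :: t) :: ts
      | [] => [[c]]

def pvMapHead (f : List Char → List Char) : List (List Char) → List (List Char)
  | [] => []
  | t :: ts => f t :: ts

lemma pvNsplit_ne_nil (cs : List Char) : pvNsplit cs ≠ [] := by
  induction cs with
  | nil => simp [pvNsplit]
  | cons c cs ih =>
    simp only [pvNsplit]
    split
    · simp
    · rcases h : pvNsplit cs with _ | ⟨t, ts⟩ <;> simp

lemma pvSplitOn_go_newline (fuel : Nat) :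
    ∀ (l cur : List Char) (accs : List (List Char)), l.length < fuel →
      PySem.Chars.splitOn.go ['\n'] fuel l cur accs =
        accs.reverse ++ pvMapHead (fun t => cur.reverse ++ t) (pvNsplit l) := by
  induction fuel with
  | zero => intro l cur accs h; omega
  | succ fuel ih =>
    intro l cur accs h
    cases l with
    | nil => simp [PySem.Chars.splitOn.go, pvNsplit, pvMapHead]
    | cons c rest =>
      have hne := pvNsplit_ne_nil rest
      rcases hns : pvNsplit rest with _ | ⟨t, ts⟩
      · exact absurd hns hne
      · by_cases hc : c = '\n'
        · subst hc
          rw [PySem.Chars.splitOn.go]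
          rw [if_pos (by simp [List.isPrefixOf])]
          simp only [List.length_cons, List.drop_succ_cons, List.length_nil, List.drop_zero]
          rw [ih _ _ _ (by simp at h ⊢; omega)]
          simp [pvNsplit, hns, pvMapHead]
        · rw [PySem.Chars.splitOn.go]
          rw [if_neg (by simp [List.isPrefixOf]; exact fun h' => hc h'.symm)]
          rw [ih _ _ _ (by simp at h ⊢; omega)]
          simp [pvNsplit, hns, hc, pvMapHead]

lemma pvSplitOn_eq_nsplit (cs : List Char) :
    PySem.Chars.splitOn cs ['\n'] = pvNsplit cs := by
  rw [PySem.Chars.splitOn, pvSplitOn_go_newline (cs.length + 1) cs [] [] (by omega)]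
  have hne := pvNsplit_ne_nil cs
  rcases hns : pvNsplit cs with _ | ⟨t, ts⟩
  · exact absurd hns hne
  · simp [pvMapHead]

lemma pvMod2 (n : Nat) : (!decide (n % 2 = 1)) = decide (n % 2 = 0) := by
  by_cases h : n % 2 = 0 <;> simp [h] <;> omega

lemma pvBeqNat (m n : Nat) : (m == n) = decide (m = n) := by
  by_cases h : m = n <;> simp [h]

lemma pvBeqMod2 (n : Nat) : (n % 2 == 0) = decide (n % 2 = 0) := by
  by_cases h : n % 2 = 0 <;> simp [h]

def pvIsBit (c : Char) : Bool := c == '0' || c == '1'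

-- canonical per-line check (A's conjunct order, counts replaced by all-bits)
def pvLineOK (F : Nat) (l : List Char) : Bool :=
  decide (l.length % 2 = 0) && (l.length == F) && l.all pvIsBit

lemma pvCharCheck_eq_all (cs : List Char) :
    pvACharCheck cs = (pvNsplit cs).all (fun l => l.all pvIsBit) := by
  induction cs with
  | nil => simp [pvACharCheck, pvNsplit]
  | cons c cs ih =>
    have hne := pvNsplit_ne_nil cs
    rcases hns : pvNsplit cs with _ | ⟨t, ts⟩
    · exact absurd hns hne
    · by_cases hc : c = '\n'
      · subst hc; simp [pvACharCheck, pvNsplit, ih, hns]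
      · by_cases hb : c = '0' ∨ c = '1'
        · have hbit : pvIsBit c = true := by rcases hb with hb | hb <;> simp [pvIsBit, hb]
          simp [pvACharCheck, pvNsplit, hc, hns, hb, hbit, ih, Bool.and_assoc]
        · have hbit : pvIsBit c = false := by
            simp [pvIsBit]; push_neg at hb; exact ⟨hb.1, hb.2⟩
          simp [pvACharCheck, pvNsplit, hc, hns, hb, hbit, ih]

lemma pvCount_single (l : List Char) (c : Char) :
    PySem.Chars.count l [c] = l.count c := by
  have go : ∀ (fuel : Nat) (m : List Char) (acc : Nat), m.length ≤ fuel →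
      PySem.Chars.count.go [c] fuel m acc = acc + m.count c := by
    intro fuel
    induction fuel with
    | zero => intro m acc h; rw [PySem.Chars.count.go]; cases m with
        | nil => simp
        | cons x xs => simp at h
    | succ fuel ih =>
      intro m acc h
      cases m with
      | nil => simp [PySem.Chars.count.go]
      | cons x xs =>
        by_cases hx : c = x
        · subst hx
          rw [PySem.Chars.count.go, if_pos (by simp [List.isPrefixOf])]
          simp only [List.length_cons, List.drop_succ_cons, List.length_nil, List.drop_zero]
          rw [ih _ _ (by simp at h ⊢; omega)]
          simp [List.count_cons]; omega
        · rw [PySem.Chars.count.go, if_neg (by simp [List.isPrefixOf]; exact hx)]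
          rw [ih _ _ (by simp at h ⊢; omega)]
          have : ¬ x = c := fun h' => hx h'.symm
          simp [List.count_cons, this]
  rw [PySem.Chars.count]
  simp only [List.isEmpty_cons, if_neg]
  rw [go l.length l 0 le_rfl]
  simp

lemma pvCounts_eq_iff (l : List Char) :
    (decide (l.length = l.count '0' + l.count '1')) = l.all pvIsBit := by
  induction l with
  | nil => simp
  | cons c cs ih =>
    by_cases hb : c = '0' ∨ c = '1'
    · have hbit : pvIsBit c = true := by rcases hb with hb | hb <;> simp [pvIsBit, hb]
      rcases hb with hb | hb <;> subst hb <;>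
        simp only [List.all_cons, hbit, Bool.true_and, ← ih, List.count_cons, List.length_cons,
          decide_eq_decide] <;>
        simp <;> omega
    · push_neg at hb
      have hbit : pvIsBit c = false := by simp [pvIsBit]; exact ⟨hb.1, hb.2⟩
      have hc0 : cs.count '0' + cs.count '1' ≤ cs.length := by
        have h := List.length_eq_countP_add_countP (p := (· == '0')) (l := cs)
        have h0 : cs.count '0' = cs.countP (· == '0') := rfl
        have h1 : cs.count '1' ≤ cs.countP (fun a => ¬(a == '0') = true) := by
          rw [List.count]
          apply List.countP_mono_left
          intro a _ ha
          simp at ha ⊢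
          simp [ha]
        omega
      simp [List.count_cons, hbit, fun h' : c = '0' => hb.1 h', fun h' : c = '1' => hb.2 h']
      omega

lemma pvALineLoop_eq_all (F : Nat) (ls : List (List Char)) :
    pvALineLoop F ls =
      ls.all (fun l => decide (l.length % 2 = 0) && (l.length == F) &&
        decide (l.length = l.count '0' + l.count '1')) := by
  induction ls with
  | nil => simp [pvALineLoop]
  | cons l ls ih =>
    simp only [pvALineLoop, pvCount_single, List.all_cons, ← ih]
    by_cases h2 : l.length % 2 = 0 <;> by_cases hF : l.length = F <;>
      by_cases hc : l.length = l.count '0' + l.count '1' <;>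
      simp [h2, hF, hc, pvMod2, pvBeqMod2, pvBeqNat, Bool.and_assoc]

def pvOK (F : Nat) (ls : List (List Char)) : Bool := ls.all (pvLineOK F)

lemma pvBLoop_some (cs : List Char) :
    ∀ (f cur : Nat),
      pvBLoop cs (some f) cur =
        match pvNsplit cs with
        | t :: ts =>
            (decide ((cur + t.length) % 2 = 0) && (cur + t.length == f) && t.all pvIsBit)
              && pvOK f ts
        | [] => true := by
  induction cs with
  | nil =>
    intro f cur
    by_cases hf : cur = f <;> by_cases h2 : cur % 2 = 0 <;>
      simp [pvBLoop, pvNsplit, pvOK, hf, h2, pvMod2, pvBeqMod2, pvBeqNat]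
  | cons c cs ih =>
    intro f cur
    have hne := pvNsplit_ne_nil cs
    rcases hns : pvNsplit cs with _ | ⟨t, ts⟩
    · exact absurd hns hne
    · by_cases hc : c = '\n'
      · subst hc
        by_cases hf : cur = f <;> by_cases h2 : cur % 2 = 0 <;>
          simp [pvBLoop, pvNsplit, pvOK, pvLineOK, hns, hf, h2, ih, pvMod2, pvBeqMod2, pvBeqNat]
      · by_cases hb : c = '0' ∨ c = '1'
        · have hbit : pvIsBit c = true := by rcases hb with hb | hb <;> simp [pvIsBit, hb]
          have harith : cur + (t.length + 1) = cur + 1 + t.length := by omega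
          simp only [pvBLoop, if_neg hc, if_pos hb, pvNsplit, hns, if_neg hc, ih,
            List.length_cons, List.all_cons, hbit, Bool.true_and, harith]
        · have hbit : pvIsBit c = false := by
            simp [pvIsBit]; push_neg at hb; exact ⟨hb.1, hb.2⟩
          simp [pvBLoop, hc, hb, pvNsplit, hns, hbit]

lemma pvBLoop_none (cs : List Char) (cur : Nat) :
    pvBLoop cs none cur =
      match pvNsplit cs with
      | t :: ts =>
          decide ((cur + t.length) % 2 = 0) && t.all pvIsBit && pvOK (cur + t.length) ts
      | [] => true := by
  induction cs generalizing cur with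
  | nil => simp [pvBLoop, pvNsplit, pvOK, pvBeqMod2, pvBeqNat]
  | cons c cs ih =>
    have hne := pvNsplit_ne_nil cs
    rcases hns : pvNsplit cs with _ | ⟨t, ts⟩
    · exact absurd hns hne
    · by_cases hc : c = '\n'
      · subst hc
        by_cases h2 : cur % 2 = 0 <;>
          simp [pvBLoop, pvNsplit, pvOK, pvLineOK, hns, h2, pvBLoop_some, pvMod2, pvBeqMod2, pvBeqNat]
      · by_cases hb : c = '0' ∨ c = '1'
        · have hbit : pvIsBit c = true := by rcases hb with hb | hb <;> simp [pvIsBit, hb]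
          have harith : cur + (t.length + 1) = cur + 1 + t.length := by omega
          simp only [pvBLoop, if_neg hc, if_pos hb, pvNsplit, hns, ih,
            List.length_cons, List.all_cons, hbit, Bool.true_and, harith]
        · have hbit : pvIsBit c = false := by
            simp [pvIsBit]; push_neg at hb; exact ⟨hb.1, hb.2⟩
          simp [pvBLoop, hc, hb, pvNsplit, hns, hbit]

lemma pvA_combine (F : Nat) (ls : List (List Char)) :
    (if ¬ ls.all (fun l => l.all pvIsBit) then false
     else ls.all (fun l => decide (l.length % 2 = 0) && (l.length == F) && l.all pvIsBit)) =
      ls.all (pvLineOK F) := by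
  by_cases hall : ls.all (fun l => l.all pvIsBit)
  · simp only [hall, not_true_eq_false, ite_false]
    rfl
  · simp only [hall, Bool.false_eq_true, not_false_eq_true, if_pos]
    rw [Bool.not_eq_true, List.all_eq_false] at hall
    obtain ⟨x, hx, hxb⟩ := hall
    symm
    rw [List.all_eq_false]
    exact ⟨x, hx, by simp [pvLineOK]; intro _ _; simpa using hxb⟩

-- ===== VERDICT (by name: the statement is the Claim_ definition above) =====
theorem syntax_check_bit_matrix_spec : Claim_equal_syntax_check_bit_matrix := by
  unfold Claim_equal_syntax_check_bit_matrix
  intro matrix _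
  unfold Spec_syntax_check_bit_matrix syntax_check_bit_matrix syntax_check_bit_matrix_alt
  have hne := pvNsplit_ne_nil matrix.toList
  rcases hns : pvNsplit matrix.toList with _ | ⟨t, ts⟩
  · exact absurd hns hne
  · rw [pvBLoop_none, hns]
    simp only [pvSplitOn_eq_nsplit, hns, pvCharCheck_eq_all, pvALineLoop_eq_all,
      pvCounts_eq_iff, List.headD_cons, Nat.zero_add]
    rw [← hns, pvA_combine, hns]
    simp [pvOK, pvLineOK, List.all_cons]
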